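-- pv_equiv track=rewrite | github.com/pypi-data/pypi-mirror-402 | packages/pygarble/pygarble-0.5.0-py3-none-any.whl/pygarble/strategies/consonant_sequence.py | _extract_words_for_analysis
-- ===== SOURCE A (Python) =====
-- def _extract_words_for_analysis(text: str):
--     """Extract words, excluding likely acronyms (all caps)."""
--     words = []
--     current_word = []
--     for c in text:
--         if c.isalpha():
--             current_word.append(c)
--         else:
--             if current_word:
--                 word = "".join(current_word)
--                 # Skip all-uppercase words (likely acronyms)
--                 if not word.isupper():
--                     words.append(word.lower())
--                 current_word = []
--     if current_word:
--         word = "".join(current_word)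
--         if not word.isupper():
--             words.append(word.lower())
--     return " ".join(words)
-- ===== SOURCE B (Python) =====
-- def _extract_words_for_analysis(text: str):
--     """Extract words, excluding likely acronyms (all caps)."""
--     cleaned = "".join(c if c.isalpha() else " " for c in text)
--     words = [w.lower() for w in cleaned.split() if not w.isupper()]
--     return " ".join(words)
-- ===== Notes on version B (the rewrite author's own statement) =====
-- stated objective: simpler
-- what changed: Replaces the manual current_word accumulator loop with its post-loop flush by a declarative pipeline: map non-alphabetic characters to spaces, split on whitespace, filter out all-uppercase words, lowercase and join.
import Mathlib
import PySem

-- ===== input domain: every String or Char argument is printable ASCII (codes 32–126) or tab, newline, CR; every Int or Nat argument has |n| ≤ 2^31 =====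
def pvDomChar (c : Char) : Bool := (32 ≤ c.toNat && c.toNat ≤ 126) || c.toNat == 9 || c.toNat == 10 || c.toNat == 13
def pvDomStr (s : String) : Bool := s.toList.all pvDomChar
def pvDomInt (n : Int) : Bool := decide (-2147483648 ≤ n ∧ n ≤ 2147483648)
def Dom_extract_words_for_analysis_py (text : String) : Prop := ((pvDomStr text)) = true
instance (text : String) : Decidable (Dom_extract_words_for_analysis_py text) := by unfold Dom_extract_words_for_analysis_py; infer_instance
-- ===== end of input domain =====

-- B replaces A's manual current-word accumulator loop (with its post-loop flush) by a
-- map-to-spaces / split / filter / lowercase / join pipeline; objective: simpler.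

-- shared helper: hand port of Python str.isupper() — at least one cased character and no
-- lowercase one; exact on the ASCII domain, where the cased characters are exactly A–Z and a–z
def pvStrIsupper (cs : List Char) : Bool :=
  cs.any (fun c => PySem.Chars.isupper c || PySem.Chars.islower c) &&
  cs.all (fun c => !PySem.Chars.islower c)

-- ===== PORT A =====
-- the post-loop (and else-branch) flush of current_word into words
def pvFlushA (words : List (List Char)) (current : List Char) : List (List Char) :=
  if current.isEmpty then words
  else if pvStrIsupper current then words
  else words ++ [PySem.Chars.lower current]

def pvStepA (st : List (List Char) × List Char) (c : Char) : List (List Char) × List Char :=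
  if PySem.Chars.isalpha c then (st.1, st.2 ++ [c])
  else (pvFlushA st.1 st.2, [])

def extract_words_for_analysis_py (text : String) : String :=
  let st := text.toList.foldl pvStepA ([], [])
  String.ofList (PySem.Chars.join [' '] (pvFlushA st.1 st.2))

-- ===== PORT B =====
def extract_words_for_analysis_py_alt (text : String) : String :=
  let cleaned := text.toList.map (fun c => if PySem.Chars.isalpha c then c else ' ')
  let words := ((PySem.Chars.split₀ cleaned).filter (fun w => !pvStrIsupper w)).map PySem.Chars.lower
  String.ofList (PySem.Chars.join [' '] words)

-- ===== PRECONDITION & SPEC =====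
def Spec_extract_words_for_analysis_py (text : String) (out : String) : Prop := out = extract_words_for_analysis_py_alt text
instance (text : String) (out : String) : Decidable (Spec_extract_words_for_analysis_py text out) := by unfold Spec_extract_words_for_analysis_py; infer_instance

-- ===== CLAIM (what is proved, stated in full; the proofs are below) =====
def Claim_equal_extract_words_for_analysis_py : Prop := ∀ (text : String), Dom_extract_words_for_analysis_py text → Spec_extract_words_for_analysis_py text (extract_words_for_analysis_py text)

-- ===== LEMMAS AND PROOFS =====
-- B's filter-then-lower pipeline, as a function on raw word lists
def pvPost (ws : List (List Char)) : List (List Char) :=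
  (ws.filter (fun w => !pvStrIsupper w)).map PySem.Chars.lower

theorem pvPost_append (xs ys : List (List Char)) : pvPost (xs ++ ys) = pvPost xs ++ pvPost ys := by
  simp [pvPost]

theorem pvFlushA_eq_post (ws : List (List Char)) (cur : List Char) :
    pvFlushA ws cur = if cur.isEmpty then ws else ws ++ pvPost [cur] := by
  unfold pvFlushA pvPost
  by_cases h : cur.isEmpty <;> by_cases hu : pvStrIsupper cur <;> simp [h, hu]

theorem pv_isspace_of_isalpha (c : Char) (h : PySem.Chars.isalpha c = true) :
    PySem.Chars.isspace c = false := by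
  have h' : 65 ≤ c.toNat ∧ c.toNat ≤ 90 ∨ 97 ≤ c.toNat ∧ c.toNat ≤ 122 := by
    simp only [PySem.Chars.isalpha, PySem.Chars.isupper, PySem.Chars.islower, Bool.or_eq_true,
      Bool.and_eq_true, decide_eq_true_eq, Char.le_def, UInt32.le_iff_toNat_le,
      Char.toNat_val] at h
    have e1 : 'A'.toNat = 65 := rfl
    have e2 : 'Z'.toNat = 90 := rfl
    have e3 : 'a'.toNat = 97 := rfl
    have e4 : 'z'.toNat = 122 := rfl
    omega
  rw [Bool.eq_false_iff]
  intro hs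
  simp only [PySem.Chars.isspace, Bool.or_eq_true, Bool.and_eq_true, decide_eq_true_eq] at hs
  omega

theorem pv_main (cs : List Char) : ∀ (cur : List Char) (acc : List (List Char)),
    (let st := cs.foldl pvStepA (pvPost acc.reverse, cur);
     pvFlushA st.1 st.2)
    = pvPost (PySem.Chars.split₀.go
        (cs.map (fun c => if PySem.Chars.isalpha c then c else ' ')) cur.reverse acc) := by
  induction cs with
  | nil =>
      intro cur acc
      simp only [List.foldl_nil, List.map_nil, PySem.Chars.split₀.go]
      rw [pvFlushA_eq_post]
      by_cases h : cur.isEmpty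
      · have hc : cur = [] := by simpa [List.isEmpty_iff] using h
        simp [hc]
      · have hc : cur ≠ [] := by simpa [List.isEmpty_iff] using h
        simp [h, pvPost_append]
  | cons c cs ih =>
      intro cur acc
      by_cases hA : PySem.Chars.isalpha c = true
      · have hs := pv_isspace_of_isalpha c hA
        simp only [List.foldl_cons, List.map_cons, pvStepA, hA, if_pos]
        rw [show PySem.Chars.split₀.go (c ::
              cs.map (fun c => if PySem.Chars.isalpha c then c else ' ')) cur.reverse acc
            = PySem.Chars.split₀.go
              (cs.map (fun c => if PySem.Chars.isalpha c then c else ' '))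
              (c :: cur.reverse) acc from by
          simp [PySem.Chars.split₀.go, hs]]
        have := ih (cur ++ [c]) acc
        simpa using this
      · have hA' : PySem.Chars.isalpha c = false := by simpa using hA
        have hsp : PySem.Chars.isspace ' ' = true := by decide
        simp only [List.foldl_cons, List.map_cons, pvStepA, hA', Bool.false_eq_true,
          if_false]
        rw [show PySem.Chars.split₀.go (' ' ::
              cs.map (fun c => if PySem.Chars.isalpha c then c else ' ')) cur.reverse acc
            = PySem.Chars.split₀.go
              (cs.map (fun c => if PySem.Chars.isalpha c then c else ' ')) []
              (if cur.reverse.isEmpty then acc else cur.reverse.reverse :: acc) from by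
          by_cases h : cur.reverse.isEmpty <;> simp [PySem.Chars.split₀.go, hsp, h]]
        by_cases h : cur.isEmpty
        · have hc : cur = [] := by simpa [List.isEmpty_iff] using h
          have := ih [] acc
          simpa [hc, pvFlushA_eq_post] using this
        · have hfl : pvFlushA (pvPost acc.reverse) cur
              = pvPost acc.reverse ++ pvPost [cur] := by
            rw [pvFlushA_eq_post, if_neg h]
          rw [hfl, if_neg (by simpa using h)]
          have := ih [] (cur :: acc)
          simpa [pvPost_append] using this

-- ===== VERDICT (by name: the statement is the Claim_ definition above) =====
theorem extract_words_for_analysis_py_spec : Claim_equal_extract_words_for_analysis_py := by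
  intro text _
  unfold Spec_extract_words_for_analysis_py extract_words_for_analysis_py extract_words_for_analysis_py_alt
  have := pv_main text.toList [] []
  simp only [List.reverse_nil, pvPost] at this
  simp [PySem.Chars.split₀] at this ⊢
  rw [this]
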